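-- pv_equiv track=rewrite | github.com/thewymoon/CDT | interpret.py | negative_ranges
-- ===== SOURCE A (Python) =====
-- def negative_ranges(values):
--     ranges = []
--     temp = []
--     state = 0
--     for i in range(len(values)):
--         if state==0 and values[i]>=0:
--             pass
--         elif state==0 and values[i]<0:
--             temp.append(i)
--             state = 1
--         elif state==1 and values[i]<0:
--             pass
--         elif state==1 and values[i]>=0:
--             temp.append(i)
--             state = 0
--             ranges.append(temp)
--             temp=[]
--     return ranges
-- ===== SOURCE B (Python) =====
-- def negative_ranges(values):
--     res = []
--     i = 0
--     n = len(values)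
--     while i < n:
--         if values[i] < 0:
--             start = i
--             while i < n and values[i] < 0:
--                 i += 1
--             if i < n:
--                 res.append([start, i])
--         i += 1
--     return res
-- ===== Notes on version B (the rewrite author's own statement) =====
-- stated objective: simpler
-- what changed: Replaces the per-index two-state machine (state flag plus temp buffer) with a run-consuming scan: an outer index walk that, on a negative value, records the start, consumes the run with an inner loop, and appends [start, i] only when the run is closed by a non-negative element.
import Mathlib
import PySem

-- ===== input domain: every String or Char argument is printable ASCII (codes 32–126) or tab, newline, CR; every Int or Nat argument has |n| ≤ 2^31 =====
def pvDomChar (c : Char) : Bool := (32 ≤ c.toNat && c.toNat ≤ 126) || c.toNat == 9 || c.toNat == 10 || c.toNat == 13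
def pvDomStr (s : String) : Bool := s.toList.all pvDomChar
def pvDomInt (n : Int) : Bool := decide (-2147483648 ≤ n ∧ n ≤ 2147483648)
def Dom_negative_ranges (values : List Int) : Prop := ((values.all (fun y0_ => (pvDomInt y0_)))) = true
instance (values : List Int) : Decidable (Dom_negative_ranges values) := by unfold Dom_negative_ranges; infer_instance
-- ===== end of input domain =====

-- B re-implements A's per-index state machine as a run-consuming scan (outer walk + inner run consumer); same return value, simpler decomposition.

-- ===== PORT A =====
-- loop body of A; values[i] is ported as pyGetD (exact here: every i produced by range(len(values)) is in range)
def pvStepA (values : List Int) (st : List (List Int) × List Int × Int) (i : Int) :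
    List (List Int) × List Int × Int :=
  let ranges := st.1
  let temp := st.2.1
  let state := st.2.2
  if state = 0 ∧ PySem.List.pyGetD values i 0 ≥ 0 then st
  else if state = 0 ∧ PySem.List.pyGetD values i 0 < 0 then (ranges, temp ++ [i], 1)
  else if state = 1 ∧ PySem.List.pyGetD values i 0 < 0 then st
  else if state = 1 ∧ PySem.List.pyGetD values i 0 ≥ 0 then (ranges ++ [temp ++ [i]], [], 0)
  else st

def negative_ranges (values : List Int) : List (List Int) :=
  ((PySem.List.pyRange 0 (values.length : Int) 1).foldl (pvStepA values) ([], [], 0)).1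

-- ===== PORT B =====
-- inner 'while i < n and values[i] < 0': returns (first non-negative index, remaining suffix)
def pvConsume : List Int → Int → Int × List Int
  | [], i => (i, [])
  | v :: rest, i => if v < 0 then pvConsume rest (i + 1) else (i, v :: rest)

lemma pvConsume_len : ∀ (xs : List Int) (i : Int), (pvConsume xs i).2.length ≤ xs.length := by
  intro xs
  induction xs with
  | nil => intro i; simp [pvConsume]
  | cons v rest ih =>
    intro i
    by_cases h : v < 0
    · simp only [pvConsume, if_pos h]
      exact le_trans (ih (i + 1)) (by simp)
    · simp [pvConsume, if_neg h]

-- outer 'while i < n' of B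
def pvGo : List Int → Int → List (List Int)
  | [], _ => []
  | v :: rest, i =>
    if v < 0 then
      match h : (pvConsume rest (i + 1)).2 with
      | [] => []
      | _ :: rest' => [i, (pvConsume rest (i + 1)).1] :: pvGo rest' ((pvConsume rest (i + 1)).1 + 1)
    else pvGo rest (i + 1)
termination_by xs _ => xs.length
decreasing_by
  · have hl := pvConsume_len rest (i + 1)
    rw [h] at hl
    simp at hl ⊢
    omega
  · simp

def negative_ranges_alt (values : List Int) : List (List Int) := pvGo values 0

-- ===== PRECONDITION & SPEC =====
def Spec_negative_ranges (values : List Int) (out : List (List Int)) : Prop := out = negative_ranges_alt values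
instance (values : List Int) (out : List (List Int)) : Decidable (Spec_negative_ranges values out) := by unfold Spec_negative_ranges; infer_instance

-- ===== CLAIM (what is proved, stated in full; the proofs are below) =====
def Claim_equal_negative_ranges : Prop := ∀ (values : List Int), Dom_negative_ranges values → Spec_negative_ranges values (negative_ranges values)

-- ===== LEMMAS AND PROOFS =====

-- what pvGo does after an opened run: consume the run starting at index i, remember start
def pvTail (xs : List Int) (i start : Int) : List (List Int) :=
  match (pvConsume xs i).2 with
  | [] => []
  | _ :: rest' => [start, (pvConsume xs i).1] :: pvGo rest' ((pvConsume xs i).1 + 1)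

lemma pvGo_nil (i : Int) : pvGo [] i = [] := by simp [pvGo]

lemma pvGo_cons (v : Int) (rest : List Int) (i : Int) :
    pvGo (v :: rest) i = if v < 0 then pvTail rest (i + 1) i else pvGo rest (i + 1) := by
  by_cases h : v < 0
  · simp only [pvGo, if_pos h, pvTail]
    rcases hc : (pvConsume rest (i + 1)).2 with _ | ⟨w, rest'⟩ <;> simp
  · simp [pvGo, if_neg h]

lemma pvTail_nil (i start : Int) : pvTail [] i start = [] := by simp [pvTail, pvConsume]

lemma pvTail_cons (v : Int) (rest : List Int) (i start : Int) :
    pvTail (v :: rest) i start =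
      if v < 0 then pvTail rest (i + 1) start else [start, i] :: pvGo rest (i + 1) := by
  by_cases h : v < 0 <;> simp [pvTail, pvConsume, h]

-- the fold of A's state machine over indices k..n-1, in both states, equals B's scan over the suffix
lemma pv_main : ∀ (m k : Nat) (values : List Int), values.length ≤ k + m →
    (∀ ranges : List (List Int),
      ((PySem.List.pyRange (k : Int) (values.length : Int) 1).foldl (pvStepA values) (ranges, [], 0)).1
        = ranges ++ pvGo (values.drop k) (k : Int)) ∧
    (∀ (ranges : List (List Int)) (start : Int),
      ((PySem.List.pyRange (k : Int) (values.length : Int) 1).foldl (pvStepA values) (ranges, [start], 1)).1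
        = ranges ++ pvTail (values.drop k) (k : Int) start) := by
  intro m
  induction m with
  | zero =>
    intro k values hlen
    have hk : values.length ≤ k := by omega
    have hr : PySem.List.pyRange (k : Int) (values.length : Int) 1 = [] :=
      PySem.List.pyRange_one_eq_nil (by exact_mod_cast hk)
    have hd : values.drop k = [] := List.drop_eq_nil_of_le hk
    constructor
    · intro ranges; rw [hr, hd, pvGo_nil]; simp [List.foldl]
    · intro ranges start; rw [hr, hd, pvTail_nil]; simp [List.foldl]
  | succ m ih =>
    intro k values hlen
    by_cases hk : k < values.length
    · have hr : PySem.List.pyRange (k : Int) (values.length : Int) 1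
          = (k : Int) :: PySem.List.pyRange ((k : Int) + 1) (values.length : Int) 1 :=
        PySem.List.pyRange_one_cons (by exact_mod_cast hk)
      have hcast : ((k : Int) + 1) = ((k + 1 : Nat) : Int) := by push_cast; ring
      have hget : PySem.List.pyGetD values (k : Int) 0 = values[k] := by
        rw [PySem.List.pyGetD_natCast]
        exact List.getD_eq_getElem values 0 hk
      have hd : values.drop k = values[k] :: values.drop (k + 1) :=
        List.drop_eq_getElem_cons hk
      have ih' := ih (k + 1) values (by omega)
      constructor
      · intro ranges
        rw [hr, List.foldl_cons, hd, pvGo_cons]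
        by_cases hv : values[k] < 0
        · have hstep : pvStepA values (ranges, [], 0) (k : Int) = (ranges, [(k : Int)], 1) := by
            simp [pvStepA, hget, hv, not_le.mpr hv]
          rw [hstep, if_pos hv, hcast]
          exact ih'.2 ranges (k : Int)
        · have hstep : pvStepA values (ranges, [], 0) (k : Int) = (ranges, [], 0) := by
            simp [pvStepA, hget, not_lt.mp hv]
          rw [hstep, if_neg hv, hcast]
          exact ih'.1 ranges
      · intro ranges start
        rw [hr, List.foldl_cons, hd, pvTail_cons]
        by_cases hv : values[k] < 0
        · have hstep : pvStepA values (ranges, [start], 1) (k : Int) = (ranges, [start], 1) := by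
            simp [pvStepA, hget, hv, not_le.mpr hv]
          rw [hstep, if_pos hv, hcast]
          exact ih'.2 ranges start
        · have hstep : pvStepA values (ranges, [start], 1) (k : Int)
              = (ranges ++ [[start, (k : Int)]], [], 0) := by
            simp [pvStepA, hget, not_lt.mp hv]
          rw [hstep, if_neg hv, hcast]
          rw [ih'.1 (ranges ++ [[start, (k : Int)]])]
          simp
    · have hk' : values.length ≤ k := by omega
      have hr : PySem.List.pyRange (k : Int) (values.length : Int) 1 = [] :=
        PySem.List.pyRange_one_eq_nil (by exact_mod_cast hk')
      have hd : values.drop k = [] := List.drop_eq_nil_of_le hk'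
      constructor
      · intro ranges; rw [hr, hd, pvGo_nil]; simp [List.foldl]
      · intro ranges start; rw [hr, hd, pvTail_nil]; simp [List.foldl]

-- ===== VERDICT (by name: the statement is the Claim_ definition above) =====
theorem negative_ranges_spec : Claim_equal_negative_ranges := by
  intro values _
  show negative_ranges values = negative_ranges_alt values
  have h := (pv_main values.length 0 values (by omega)).1 []
  simpa [negative_ranges, negative_ranges_alt] using h
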